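-- pv_equiv track=rewrite | github.com/yuw14/IE-531-Algorithms-for-Data-Analytics | prog6/yuw14_prog6.py | get_lexicographic_index
-- ===== SOURCE A (Python) =====
-- def get_lexicographic_index(x, n, dim) :
--    # ** WRITE THIS PART **
--     number = 0
--     coordinates = []
--     for i in range(dim):
--         coordinates.append(x[i])
--     a = dim-1
--     for item in coordinates:
--         if(a>=0):
--             number+=item*pow(n,a)
--             a=a-1
--     return number
-- ===== SOURCE B (Python) =====
-- def get_lexicographic_index(x, n, dim):
--     number = 0
--     for i in range(dim):
--         number = number * n + x[i]
--     return number
-- ===== Notes on version B (the rewrite author's own statement) =====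
-- stated objective: idiomatic
-- what changed: Replaces the copy-the-coordinates pass plus per-digit pow(n,a) with a single Horner-scheme pass maintaining one running total.
import Mathlib
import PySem

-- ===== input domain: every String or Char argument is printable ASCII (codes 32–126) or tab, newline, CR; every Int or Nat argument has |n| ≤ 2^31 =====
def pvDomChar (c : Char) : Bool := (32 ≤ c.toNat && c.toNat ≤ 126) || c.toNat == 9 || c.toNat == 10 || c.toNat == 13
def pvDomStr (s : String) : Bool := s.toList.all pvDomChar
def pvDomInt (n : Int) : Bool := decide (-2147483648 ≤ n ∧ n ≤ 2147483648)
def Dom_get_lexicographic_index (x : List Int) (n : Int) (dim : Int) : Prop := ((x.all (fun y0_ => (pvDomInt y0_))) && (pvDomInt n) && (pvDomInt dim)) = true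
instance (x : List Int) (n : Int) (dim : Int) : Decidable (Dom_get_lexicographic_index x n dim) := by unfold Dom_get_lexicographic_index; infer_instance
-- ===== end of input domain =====

-- B replaces the coordinate-copying pass and the per-position pow(n, a) with a single
-- Horner-scheme pass keeping one running total (objective: idiomatic).

-- ===== PORT A =====
def get_lexicographic_index (x : List Int) (n : Int) (dim : Int) : Int :=
  -- coordinates = []; for i in range(dim): coordinates.append(x[i])
  let coordinates : List Int :=
    (PySem.List.pyRange 0 dim 1).foldl (fun acc i => acc ++ [PySem.List.pyGetD x i 0]) []
  -- a = dim-1; for item in coordinates: if a >= 0: number += item*pow(n,a); a = a-1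
  (coordinates.foldl
      (fun (p : Int × Int) item =>
        if p.2 ≥ 0 then (p.1 + item * n ^ p.2.toNat, p.2 - 1) else p)
      (0, dim - 1)).1

-- ===== PORT B =====
def get_lexicographic_index_alt (x : List Int) (n : Int) (dim : Int) : Int :=
  (PySem.List.pyRange 0 dim 1).foldl (fun number i => number * n + PySem.List.pyGetD x i 0) 0

-- ===== PRECONDITION & SPEC =====
-- Pre_ excludes exactly the inputs where Python A raises IndexError: dim > len(x).
def Pre_get_lexicographic_index (x : List Int) (n : Int) (dim : Int) : Prop :=
  dim ≤ (x.length : Int)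
instance (x : List Int) (n : Int) (dim : Int) : Decidable (Pre_get_lexicographic_index x n dim) := by
  unfold Pre_get_lexicographic_index; infer_instance

def pvWitness_get_lexicographic_index : List Int × Int × Int := ([2, 0, 1], 3, 3)

def Spec_get_lexicographic_index (x : List Int) (n : Int) (dim : Int) (out : Int) : Prop := out = get_lexicographic_index_alt x n dim
instance (x : List Int) (n : Int) (dim : Int) (out : Int) : Decidable (Spec_get_lexicographic_index x n dim out) := by unfold Spec_get_lexicographic_index; infer_instance

-- ===== CLAIM (what is proved, stated in full; the proofs are below) =====
def Claim_equal_get_lexicographic_index : Prop := ∀ (x : List Int) (n : Int) (dim : Int), Dom_get_lexicographic_index x n dim → Pre_get_lexicographic_index x n dim → Spec_get_lexicographic_index x n dim (get_lexicographic_index x n dim)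

-- ===== LEMMAS AND PROOFS =====

-- A's first loop builds the mapped list.
theorem pv_coords_eq (r : List Int) (g : Int → Int) (acc : List Int) :
    r.foldl (fun acc i => acc ++ [g i]) acc = acc ++ r.map g := by
  induction r generalizing acc with
  | nil => simp
  | cons i r ih => simp [List.foldl_cons, ih]

-- Horner fold with a shifted start value.
theorem pv_horner_shift (n : Int) (ys : List Int) (c : Int) :
    ys.foldl (fun acc y => acc * n + y) c
      = c * n ^ ys.length + ys.foldl (fun acc y => acc * n + y) 0 := by
  induction ys generalizing c with
  | nil => simp
  | cons y ys ih =>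
    simp only [List.foldl_cons, List.length_cons]
    rw [ih (c * n + y), ih (0 * n + y)]
    ring

-- A's second loop (pair fold, exponent counter) equals the Horner fold.
theorem pv_pow_eq_horner (n : Int) (ys : List Int) (s : Int) :
    (ys.foldl
        (fun (p : Int × Int) item =>
          if p.2 ≥ 0 then (p.1 + item * n ^ p.2.toNat, p.2 - 1) else p)
        (s, (ys.length : Int) - 1)).1
      = s + ys.foldl (fun acc y => acc * n + y) 0 := by
  induction ys generalizing s with
  | nil => simp
  | cons y ys ih =>
    have h : ((y :: ys).length : Int) - 1 = (ys.length : Int) := by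
      simp
    rw [h]
    simp only [List.foldl_cons]
    rw [if_pos (by positivity)]
    have ht : (ys.length : Int).toNat = ys.length := Int.toNat_natCast _
    rw [ht]
    rw [ih (s + y * n ^ ys.length)]
    rw [pv_horner_shift n ys (0 * n + y)]
    ring

-- ===== VERDICT (by name: the statement is the Claim_ definition above) =====
theorem get_lexicographic_index_spec : Claim_equal_get_lexicographic_index := by
  intro x n dim _ _
  unfold Spec_get_lexicographic_index get_lexicographic_index get_lexicographic_index_alt
  by_cases hle : dim ≤ 0
  · rw [PySem.List.pyRange_one_eq_nil (by simpa using hle)]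
    simp
  · have hpos : 0 < dim := by omega
    rw [pv_coords_eq]
    simp only [List.nil_append]
    have hlen : (((PySem.List.pyRange 0 dim 1).map (fun i => PySem.List.pyGetD x i 0)).length : Int) - 1 = dim - 1 := by
      simp [PySem.List.length_pyRange_one]
      omega
    rw [← hlen, pv_pow_eq_horner]
    rw [List.foldl_map]
    ring
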